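-- pv_equiv track=rewrite | github.com/HiteshB0/Budge | app/api/endpoints/transactions.py | categorize_merchant
-- ===== SOURCE A (Python) =====
-- def categorize_merchant(merchant_name: str) -> str:
--     """Simple keyword-based categorization"""
--     m = merchant_name.lower()
--     if any(x in m for x in ['starbucks', 'coffee', 'cafe', 'restaurant', 'dining', 'burger', 'pizza', 'dunkin', 'mcdonalds']):
--         return "Food & Dining"
--     if any(x in m for x in ['uber', 'lyft', 'taxi', 'gas', 'shell', 'fuel', 'parking', 'metro']):
--         return "Transportation"
--     if any(x in m for x in ['amazon', 'shopping', 'store', 'walmart', 'target', 'myntra', 'flipkart', 'clothing']):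
--         return "Shopping"
--     if any(x in m for x in ['netflix', 'spotify', 'movie', 'cinema', 'hulu', 'games']):
--         return "Entertainment"
--     if any(x in m for x in ['bill', 'utility', 'rent', 'electric', 'water', 'internet']):
--         return "Bills & Utilities"
--     if any(x in m for x in ['grocery', 'market', 'foods', 'trader']):
--         return "Groceries"
--     return "Uncategorized"
-- ===== SOURCE B (Python) =====
-- # Sliding-window lookup: hash every 3..10-char window of the lowercased name
-- # into a keyword->rank dict, keep the best (lowest) rank, then map rank->category.
-- CATEGORIES = ["Food & Dining", "Transportation", "Shopping", "Entertainment",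
--               "Bills & Utilities", "Groceries", "Uncategorized"]
--
-- KW_RANK = {}
-- for _rank, _kws in enumerate([
--     ['starbucks', 'coffee', 'cafe', 'restaurant', 'dining', 'burger', 'pizza', 'dunkin', 'mcdonalds'],
--     ['uber', 'lyft', 'taxi', 'gas', 'shell', 'fuel', 'parking', 'metro'],
--     ['amazon', 'shopping', 'store', 'walmart', 'target', 'myntra', 'flipkart', 'clothing'],
--     ['netflix', 'spotify', 'movie', 'cinema', 'hulu', 'games'],
--     ['bill', 'utility', 'rent', 'electric', 'water', 'internet'],
--     ['grocery', 'market', 'foods', 'trader'],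
-- ]):
--     for _k in _kws:
--         KW_RANK[_k] = _rank
--
-- def categorize_merchant(merchant_name: str) -> str:
--     m = merchant_name.lower()
--     best = 6
--     for i in range(len(m)):
--         for L in range(3, 11):
--             r = KW_RANK.get(m[i:i+L], 6)
--             if r < best:
--                 best = r
--     return CATEGORIES[best]
-- ===== Notes on version B (the rewrite author's own statement) =====
-- stated objective: alternative
-- what changed: Instead of testing each keyword for membership category by category, B slides over the lowercased name once, hashing every 3..10-character window into a flat keyword-to-rank dict, keeps the minimum rank seen, and maps that rank to its category name (a windowed-lookup restructuring, not claimed faster).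
import Mathlib
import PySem

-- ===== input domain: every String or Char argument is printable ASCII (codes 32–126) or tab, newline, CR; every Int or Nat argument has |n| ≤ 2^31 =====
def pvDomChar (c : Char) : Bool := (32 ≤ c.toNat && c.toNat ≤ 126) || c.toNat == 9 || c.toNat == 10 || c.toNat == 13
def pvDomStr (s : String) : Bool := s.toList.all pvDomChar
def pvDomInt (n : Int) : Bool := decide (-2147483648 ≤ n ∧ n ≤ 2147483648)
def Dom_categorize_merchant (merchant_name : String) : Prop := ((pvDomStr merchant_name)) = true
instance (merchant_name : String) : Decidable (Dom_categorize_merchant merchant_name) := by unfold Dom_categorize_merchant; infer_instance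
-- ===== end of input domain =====

-- B replaces the per-category keyword membership tests by a single sliding-window scan:
-- every 3..10-character window of the lowercased name is looked up in a flat keyword→rank
-- dict, the minimum rank is kept, and the rank indexes a category list (alternative restructuring; not claimed faster).

-- ===== PORT A =====
def categorize_merchant (merchant_name : String) : String :=
  let m := PySem.Str.lower merchant_name
  if (["starbucks", "coffee", "cafe", "restaurant", "dining", "burger", "pizza", "dunkin", "mcdonalds"].any
      (fun x => PySem.Str.isIn x m)) then "Food & Dining"
  else if (["uber", "lyft", "taxi", "gas", "shell", "fuel", "parking", "metro"].any
      (fun x => PySem.Str.isIn x m)) then "Transportation"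
  else if (["amazon", "shopping", "store", "walmart", "target", "myntra", "flipkart", "clothing"].any
      (fun x => PySem.Str.isIn x m)) then "Shopping"
  else if (["netflix", "spotify", "movie", "cinema", "hulu", "games"].any
      (fun x => PySem.Str.isIn x m)) then "Entertainment"
  else if (["bill", "utility", "rent", "electric", "water", "internet"].any
      (fun x => PySem.Str.isIn x m)) then "Bills & Utilities"
  else if (["grocery", "market", "foods", "trader"].any
      (fun x => PySem.Str.isIn x m)) then "Groceries"
  else "Uncategorized"

-- ===== PORT B =====
def pvCategories : List String :=
  ["Food & Dining", "Transportation", "Shopping", "Entertainment",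
   "Bills & Utilities", "Groceries", "Uncategorized"]

def pvKwPairs : List (String × Int) :=
  [("starbucks", 0), ("coffee", 0), ("cafe", 0), ("restaurant", 0), ("dining", 0),
   ("burger", 0), ("pizza", 0), ("dunkin", 0), ("mcdonalds", 0),
   ("uber", 1), ("lyft", 1), ("taxi", 1), ("gas", 1), ("shell", 1), ("fuel", 1),
   ("parking", 1), ("metro", 1),
   ("amazon", 2), ("shopping", 2), ("store", 2), ("walmart", 2), ("target", 2),
   ("myntra", 2), ("flipkart", 2), ("clothing", 2),
   ("netflix", 3), ("spotify", 3), ("movie", 3), ("cinema", 3), ("hulu", 3), ("games", 3),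
   ("bill", 4), ("utility", 4), ("rent", 4), ("electric", 4), ("water", 4), ("internet", 4),
   ("grocery", 5), ("market", 5), ("foods", 5), ("trader", 5)]

def pvKwRank : PySem.Dict String Int := PySem.Dict.ofList pvKwPairs

def categorize_merchant_alt (merchant_name : String) : String :=
  let m := PySem.Str.lower merchant_name
  let best := (PySem.List.pyRange 0 (PySem.Str.len m) 1).foldl (fun best i =>
    (PySem.List.pyRange 3 11 1).foldl (fun b L =>
      let r := PySem.Dict.getD pvKwRank (PySem.Str.slice m (some i) (some (i + L))) 6
      if r < b then r else b) best) 6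
  PySem.List.pyGetD pvCategories best ""

-- ===== PRECONDITION & SPEC =====
def Spec_categorize_merchant (merchant_name : String) (out : String) : Prop := out = categorize_merchant_alt merchant_name
instance (merchant_name : String) (out : String) : Decidable (Spec_categorize_merchant merchant_name out) := by unfold Spec_categorize_merchant; infer_instance

-- ===== CLAIM (what is proved, stated in full; the proofs are below) =====
def Claim_equal_categorize_merchant : Prop := ∀ (merchant_name : String), Dom_categorize_merchant merchant_name → Spec_categorize_merchant merchant_name (categorize_merchant merchant_name)

-- ===== LEMMAS AND PROOFS =====

-- the six keyword lists of A, indexed by rank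
def pvKwlist (j : Int) : List String :=
  if j = 0 then ["starbucks", "coffee", "cafe", "restaurant", "dining", "burger", "pizza", "dunkin", "mcdonalds"]
  else if j = 1 then ["uber", "lyft", "taxi", "gas", "shell", "fuel", "parking", "metro"]
  else if j = 2 then ["amazon", "shopping", "store", "walmart", "target", "myntra", "flipkart", "clothing"]
  else if j = 3 then ["netflix", "spotify", "movie", "cinema", "hulu", "games"]
  else if j = 4 then ["bill", "utility", "rent", "electric", "water", "internet"]
  else if j = 5 then ["grocery", "market", "foods", "trader"]
  else []

-- all window ranks B's double loop inspects
def pvMatches (m : String) : List Int :=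
  (PySem.List.pyRange 0 (PySem.Str.len m) 1).flatMap (fun i =>
    (PySem.List.pyRange 3 11 1).map (fun L =>
      PySem.Dict.getD pvKwRank (PySem.Str.slice m (some i) (some (i + L))) 6))

def pvBest (m : String) : Int := (pvMatches m).foldl (fun b r => if r < b then r else b) 6

def pvMatched (m : String) (j : Int) : Prop := ∃ k ∈ pvKwlist j, PySem.Str.isIn k m = true


-- B's nested fold equals a fold of the running minimum over the flat list of window ranks
theorem pvAlt_eq (mn : String) :
    categorize_merchant_alt mn =
      PySem.List.pyGetD pvCategories (pvBest (PySem.Str.lower mn)) "" := by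
  unfold categorize_merchant_alt pvBest pvMatches
  simp only [List.foldl_flatMap, List.foldl_map]

theorem pvFold_le_init (l : List Int) (init : Int) :
    l.foldl (fun b r => if r < b then r else b) init ≤ init := by
  induction l generalizing init with
  | nil => simp
  | cons x xs ih =>
    simp only [List.foldl]
    refine le_trans (ih _) ?_
    split <;> omega

theorem pvFold_le_mem (l : List Int) (init r : Int) (h : r ∈ l) :
    l.foldl (fun b r => if r < b then r else b) init ≤ r := by
  induction l generalizing init with
  | nil => simp at h
  | cons x xs ih =>
    simp only [List.foldl]
    rcases List.mem_cons.mp h with rfl | h'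
    · refine le_trans (pvFold_le_init _ _) ?_
      split <;> omega
    · exact ih _ h'

theorem pvFold_mem_or_init (l : List Int) (init : Int) :
    l.foldl (fun b r => if r < b then r else b) init = init ∨
      l.foldl (fun b r => if r < b then r else b) init ∈ l := by
  induction l generalizing init with
  | nil => simp
  | cons x xs ih =>
    simp only [List.foldl]
    by_cases hx : x < init <;> simp only [hx, if_pos, if_neg, not_false_iff] <;>
      rcases ih (if x < init then x else init) with h | h <;> simp [hx] at h <;> simp [h]

set_option maxRecDepth 40000 in
theorem pvKw_facts : ∀ j ∈ ([0, 1, 2, 3, 4, 5] : List Int), ∀ k ∈ pvKwlist j,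
    PySem.Dict.getD pvKwRank k 6 = j ∧ 3 ≤ k.toList.length ∧ k.toList.length ≤ 10 := by decide

set_option maxRecDepth 40000 in
theorem pvKw_items : pvKwRank.items = pvKwPairs := by decide

set_option maxRecDepth 40000 in
theorem pvPair_facts : ∀ p ∈ pvKwPairs, p.2 ∈ ([0, 1, 2, 3, 4, 5] : List Int) ∧ p.1 ∈ pvKwlist p.2 := by
  decide

set_option maxRecDepth 40000 in
theorem pvMem_matches (m : String) (j : Int) (hj : j ∈ ([0, 1, 2, 3, 4, 5] : List Int))
    (h : pvMatched m j) : j ∈ pvMatches m := by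
  obtain ⟨k, hk, hin⟩ := h
  obtain ⟨hget, hlen3, hlen10⟩ := pvKw_facts j hj k hk
  obtain ⟨s, t, hst⟩ := (PySem.Str.isIn_iff_infix k m).mp hin
  refine List.mem_flatMap.mpr ⟨(s.length : Int), ?_, ?_⟩
  · refine (PySem.List.mem_pyRange_one).mpr ⟨by exact_mod_cast Int.natCast_nonneg s.length, ?_⟩
    have hlen : m.toList.length = s.length + k.toList.length + t.length := by
      rw [← hst]; simp [List.length_append]; omega
    have : PySem.Str.len m = (m.toList.length : Int) := by
      simp [PySem.Str.len_eq]
    rw [this]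
    omega
  · refine List.mem_map.mpr ⟨(k.toList.length : Int), ?_, ?_⟩
    · exact (PySem.List.mem_pyRange_one).mpr ⟨by exact_mod_cast hlen3, by exact_mod_cast (by omega : k.toList.length < 11)⟩
    · have hslice : PySem.Str.slice m (some (s.length : Int)) (some ((s.length : Int) + (k.toList.length : Int))) = k := by
        apply String.toList_inj.mp
        have h1 : (PySem.Str.slice m (some (s.length : Int)) (some ((s.length : Int) + (k.toList.length : Int)))).toList
            = PySem.List.slice m.toList (some (s.length : Int)) (some ((s.length : Int) + (k.toList.length : Int))) := by
          simp [PySem.Str.toList_slice]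
        rw [h1, PySem.List.slice_natCast_add, ← hst, List.append_assoc, List.drop_left, List.take_left]
      rw [hslice, hget]

theorem pvMatched_of_mem (m : String) (r : Int) (h : r ∈ pvMatches m) :
    r = 6 ∨ (r ∈ ([0, 1, 2, 3, 4, 5] : List Int) ∧ pvMatched m r) := by
  obtain ⟨i, hi, hr⟩ := List.mem_flatMap.mp h
  obtain ⟨L, hL, hval⟩ := List.mem_map.mp hr
  obtain ⟨hi0, _⟩ := (PySem.List.mem_pyRange_one).mp hi
  obtain ⟨hL3, _⟩ := (PySem.List.mem_pyRange_one).mp hL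
  set w := PySem.Str.slice m (some i) (some (i + L)) with hw
  cases hget : PySem.Dict.get? pvKwRank w with
  | none =>
    left
    rw [← hval, PySem.Dict.getD_eq_get?_getD, hget]; rfl
  | some v =>
    right
    have hrv : r = v := by
      rw [← hval, PySem.Dict.getD_eq_get?_getD, hget]; rfl
    have hmem : (w, v) ∈ pvKwPairs := by
      rw [← pvKw_items]
      exact PySem.Dict.mem_items_of_get?_eq_some _ hget
    obtain ⟨hv6, hvl⟩ := pvPair_facts _ hmem
    subst hrv
    refine ⟨hv6, w, hvl, ?_⟩
    apply (PySem.Str.isIn_iff_infix w m).mpr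
    have hwl : w.toList = (m.toList.drop i.toNat).take ((i + L).toNat - i.toNat) := by
      rw [hw]
      have h1 : (PySem.Str.slice m (some i) (some (i + L))).toList
          = PySem.List.slice m.toList (some i) (some (i + L)) := by
        simp [PySem.Str.toList_slice]
      rw [h1, PySem.List.slice_toNat _ hi0 (by omega)]
    rw [hwl]
    exact ((m.toList.drop i.toNat).take_prefix _).isInfix.trans (m.toList.drop_suffix i.toNat).isInfix

theorem pvBest_eq (m : String) (j : Int) (h6 : j ≤ 6)
    (hm : j = 6 ∨ j ∈ pvMatches m) (hlb : ∀ r ∈ pvMatches m, j ≤ r) : pvBest m = j := by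
  have h1 : pvBest m ≤ j := by
    rcases hm with rfl | hmem
    · exact pvFold_le_init _ _
    · exact pvFold_le_mem _ _ _ hmem
  have h2 : j ≤ pvBest m := by
    rcases pvFold_mem_or_init (pvMatches m) 6 with he | hmem
    · unfold pvBest; omega
    · exact hlb _ hmem
  omega

theorem pvKwlist_0 : pvKwlist 0 = ["starbucks", "coffee", "cafe", "restaurant", "dining", "burger", "pizza", "dunkin", "mcdonalds"] := by norm_num [pvKwlist]
theorem pvKwlist_1 : pvKwlist 1 = ["uber", "lyft", "taxi", "gas", "shell", "fuel", "parking", "metro"] := by norm_num [pvKwlist]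
theorem pvKwlist_2 : pvKwlist 2 = ["amazon", "shopping", "store", "walmart", "target", "myntra", "flipkart", "clothing"] := by norm_num [pvKwlist]
theorem pvKwlist_3 : pvKwlist 3 = ["netflix", "spotify", "movie", "cinema", "hulu", "games"] := by norm_num [pvKwlist]
theorem pvKwlist_4 : pvKwlist 4 = ["bill", "utility", "rent", "electric", "water", "internet"] := by norm_num [pvKwlist]
theorem pvKwlist_5 : pvKwlist 5 = ["grocery", "market", "foods", "trader"] := by norm_num [pvKwlist]

theorem pvAny_iff (m : String) (j : Int) :
    ((pvKwlist j).any (fun x => PySem.Str.isIn x m) = true) ↔ pvMatched m j := by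
  simp [pvMatched, List.any_eq_true]

-- ===== VERDICT (by name: the statement is the Claim_ definition above) =====
set_option maxHeartbeats 1000000 in
set_option maxRecDepth 40000 in
theorem categorize_merchant_spec : Claim_equal_categorize_merchant := by
  intro mn _
  unfold Spec_categorize_merchant
  rw [pvAlt_eq]
  unfold categorize_merchant
  rw [← pvKwlist_0, ← pvKwlist_1, ← pvKwlist_2, ← pvKwlist_3, ← pvKwlist_4, ← pvKwlist_5]
  set m := PySem.Str.lower mn with hm
  have hlb : ∀ (j : Int), j ≤ 6 → (∀ j' ∈ ([0, 1, 2, 3, 4, 5] : List Int), j' < j → ¬ pvMatched m j') →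
      ∀ r ∈ pvMatches m, j ≤ r := by
    intro j hj6 hnone r hr
    rcases pvMatched_of_mem m r hr with rfl | ⟨hr6, hmr⟩
    · omega
    · by_contra hlt
      push Not at hlt
      exact hnone r hr6 (by omega) hmr
  dsimp only
  split_ifs with h0 h1 h2 h3 h4 h5
  ·
    have hnone : ∀ j' ∈ ([0, 1, 2, 3, 4, 5] : List Int), j' < (0 : Int) → ¬ pvMatched m j' := by
      intro j' hj' hlt hm'
      have hx := (pvAny_iff m j').mpr hm'
      simp only [List.mem_cons, List.not_mem_nil, or_false] at hj'
      rcases hj' with rfl | rfl | rfl | rfl | rfl | rfl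

      all_goals omega
    rw [pvBest_eq m 0 (by omega)
      (Or.inr (pvMem_matches m 0 (by decide) ((pvAny_iff m 0).mp h0)))
      (hlb 0 (by omega) hnone)]
    rfl
  ·
    have hnone : ∀ j' ∈ ([0, 1, 2, 3, 4, 5] : List Int), j' < (1 : Int) → ¬ pvMatched m j' := by
      intro j' hj' hlt hm'
      have hx := (pvAny_iff m j').mpr hm'
      simp only [List.mem_cons, List.not_mem_nil, or_false] at hj'
      rcases hj' with rfl | rfl | rfl | rfl | rfl | rfl
      · exact h0 hx
      all_goals omega
    rw [pvBest_eq m 1 (by omega)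
      (Or.inr (pvMem_matches m 1 (by decide) ((pvAny_iff m 1).mp h1)))
      (hlb 1 (by omega) hnone)]
    rfl
  ·
    have hnone : ∀ j' ∈ ([0, 1, 2, 3, 4, 5] : List Int), j' < (2 : Int) → ¬ pvMatched m j' := by
      intro j' hj' hlt hm'
      have hx := (pvAny_iff m j').mpr hm'
      simp only [List.mem_cons, List.not_mem_nil, or_false] at hj'
      rcases hj' with rfl | rfl | rfl | rfl | rfl | rfl
      · exact h0 hx
      · exact h1 hx
      all_goals omega
    rw [pvBest_eq m 2 (by omega)
      (Or.inr (pvMem_matches m 2 (by decide) ((pvAny_iff m 2).mp h2)))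
      (hlb 2 (by omega) hnone)]
    rfl
  ·
    have hnone : ∀ j' ∈ ([0, 1, 2, 3, 4, 5] : List Int), j' < (3 : Int) → ¬ pvMatched m j' := by
      intro j' hj' hlt hm'
      have hx := (pvAny_iff m j').mpr hm'
      simp only [List.mem_cons, List.not_mem_nil, or_false] at hj'
      rcases hj' with rfl | rfl | rfl | rfl | rfl | rfl
      · exact h0 hx
      · exact h1 hx
      · exact h2 hx
      all_goals omega
    rw [pvBest_eq m 3 (by omega)
      (Or.inr (pvMem_matches m 3 (by decide) ((pvAny_iff m 3).mp h3)))
      (hlb 3 (by omega) hnone)]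
    rfl
  ·
    have hnone : ∀ j' ∈ ([0, 1, 2, 3, 4, 5] : List Int), j' < (4 : Int) → ¬ pvMatched m j' := by
      intro j' hj' hlt hm'
      have hx := (pvAny_iff m j').mpr hm'
      simp only [List.mem_cons, List.not_mem_nil, or_false] at hj'
      rcases hj' with rfl | rfl | rfl | rfl | rfl | rfl
      · exact h0 hx
      · exact h1 hx
      · exact h2 hx
      · exact h3 hx
      all_goals omega
    rw [pvBest_eq m 4 (by omega)
      (Or.inr (pvMem_matches m 4 (by decide) ((pvAny_iff m 4).mp h4)))
      (hlb 4 (by omega) hnone)]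
    rfl
  ·
    have hnone : ∀ j' ∈ ([0, 1, 2, 3, 4, 5] : List Int), j' < (5 : Int) → ¬ pvMatched m j' := by
      intro j' hj' hlt hm'
      have hx := (pvAny_iff m j').mpr hm'
      simp only [List.mem_cons, List.not_mem_nil, or_false] at hj'
      rcases hj' with rfl | rfl | rfl | rfl | rfl | rfl
      · exact h0 hx
      · exact h1 hx
      · exact h2 hx
      · exact h3 hx
      · exact h4 hx
      all_goals omega
    rw [pvBest_eq m 5 (by omega)
      (Or.inr (pvMem_matches m 5 (by decide) ((pvAny_iff m 5).mp h5)))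
      (hlb 5 (by omega) hnone)]
    rfl
  ·
    have hnone : ∀ j' ∈ ([0, 1, 2, 3, 4, 5] : List Int), j' < (6 : Int) → ¬ pvMatched m j' := by
      intro j' hj' hlt hm'
      have hx := (pvAny_iff m j').mpr hm'
      simp only [List.mem_cons, List.not_mem_nil, or_false] at hj'
      rcases hj' with rfl | rfl | rfl | rfl | rfl | rfl
      · exact h0 hx
      · exact h1 hx
      · exact h2 hx
      · exact h3 hx
      · exact h4 hx
      · exact h5 hx
    rw [pvBest_eq m 6 (by omega) (Or.inl rfl) (hlb 6 (by omega) hnone)]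
    rfl
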